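-- pv_equiv track=rewrite | github.com/LocalGroup-VLALegacy/QAPlotter | qaplotter/html_linking.py | make_sidebar
-- ===== SOURCE A (Python) =====
-- def make_sidebar(field_dict, active_idx=0):
--     '''
--     Persistent side bar with all field names. For quick switching.
--     '''
--
--     sidebar_string = '<div class="sidebar">\n'
--
--     if active_idx is None:
--         sidebar_string += '    <a class="active" href="index.html">Home</a>\n'
--     else:
--         sidebar_string += '    <a class="" href="index.html">Home</a>\n'
--
--     targsumm1_name = "target_amptime_summary_plotly_interactive"
--
--     class_is = "active" if active_idx == 0 else ""
--     sidebar_string += f'    <a class="{class_is}" href="linker_{targsumm1_name}.html">Target Summary Amp-Time</a>\n'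
--
--     targsumm2_name = "target_ampfreq_summary_plotly_interactive"
--
--     class_is = "active" if active_idx == 1 else ""
--     sidebar_string += f'    <a class="{class_is}" href="linker_{targsumm2_name}.html">Target Summary Amp-Freq</a>\n'
--
--     for i, field in enumerate(field_dict):
--
--         # Set as active
--         if active_idx is None:
--             class_is = ""
--         elif i == active_idx - 2:
--             class_is = "active"
--         else:
--             class_is = ""
--
--         sidebar_string += f'    <a class="{class_is}" href="linker_{field}.html">{i+1}. {field} <br><small>{field_dict[field]}</small> </a>\n'
--
--     sidebar_string += '</div>\n\n'
--
--     return sidebar_string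
-- ===== SOURCE B (Python) =====
-- def make_sidebar(field_dict, active_idx=0):
--     '''
--     Persistent side bar with all field names. For quick switching.
--     '''
--     records = [
--         ("index.html", "Home", active_idx is None),
--         ("linker_target_amptime_summary_plotly_interactive.html",
--          "Target Summary Amp-Time", active_idx == 0),
--         ("linker_target_ampfreq_summary_plotly_interactive.html",
--          "Target Summary Amp-Freq", active_idx == 1),
--     ]
--     for i, field in enumerate(field_dict):
--         records.append((f"linker_{field}.html",
--                         f"{i + 1}. {field} <br><small>{field_dict[field]}</small> ",
--                         active_idx is not None and i == active_idx - 2))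
--     parts = ['<div class="sidebar">\n']
--     for href, text, active in records:
--         cls = "active" if active else ""
--         parts.append(f'    <a class="{cls}" href="{href}">{text}</a>\n')
--     parts.append('</div>\n\n')
--     return "".join(parts)
-- ===== Notes on version B (the rewrite author's own statement) =====
-- stated objective: alternative
-- what changed: B replaces A's four bespoke string-append branches plus an in-loop formatting pass with a data table of (href, label, is_active) link records built first and a single uniform rendering pass joined at the end.
import Mathlib
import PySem

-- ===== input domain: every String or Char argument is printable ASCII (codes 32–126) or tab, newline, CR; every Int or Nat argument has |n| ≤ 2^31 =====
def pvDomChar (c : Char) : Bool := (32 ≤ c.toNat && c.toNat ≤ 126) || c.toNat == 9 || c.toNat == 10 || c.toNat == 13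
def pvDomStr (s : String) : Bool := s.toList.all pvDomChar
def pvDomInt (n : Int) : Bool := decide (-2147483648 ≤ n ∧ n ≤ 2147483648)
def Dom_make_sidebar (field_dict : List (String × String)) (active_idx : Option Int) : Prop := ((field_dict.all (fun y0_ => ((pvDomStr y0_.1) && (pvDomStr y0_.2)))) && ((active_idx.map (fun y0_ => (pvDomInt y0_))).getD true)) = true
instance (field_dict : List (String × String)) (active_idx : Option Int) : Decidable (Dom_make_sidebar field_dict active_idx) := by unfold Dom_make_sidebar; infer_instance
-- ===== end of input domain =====

-- B builds one uniform list of (href, text, active) link records and renders them in a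
-- single pass, replacing A's four bespoke string-append branches plus field loop
-- (objective: alternative decomposition, same cost).

-- ===== PORT A =====
-- literal transliteration of A: sequential string accumulation, then a fold over the
-- enumerated dict keys (the Python dict argument is the assoc list via PySem.Dict.ofList).
def make_sidebar (field_dict : List (String × String)) (active_idx : Option Int) : String :=
  let d := PySem.Dict.ofList field_dict
  let s0 := "<div class=\"sidebar\">\n"
  let s1 := s0 ++ (match active_idx with
    | none => "    <a class=\"active\" href=\"index.html\">Home</a>\n"
    | some _ => "    <a class=\"\" href=\"index.html\">Home</a>\n")
  let targsumm1 := "target_amptime_summary_plotly_interactive"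
  let c1 := if active_idx = some 0 then "active" else ""
  let s2 := s1 ++ ("    <a class=\"" ++ c1 ++ "\" href=\"linker_" ++ targsumm1 ++ ".html\">Target Summary Amp-Time</a>\n")
  let targsumm2 := "target_ampfreq_summary_plotly_interactive"
  let c2 := if active_idx = some 1 then "active" else ""
  let s3 := s2 ++ ("    <a class=\"" ++ c2 ++ "\" href=\"linker_" ++ targsumm2 ++ ".html\">Target Summary Amp-Freq</a>\n")
  let s4 := (PySem.List.enumerate d.keys 0).foldl (fun acc p =>
    let class_is := match active_idx with
      | none => ""
      | some a => if p.1 = a - 2 then "active" else ""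
    acc ++ ("    <a class=\"" ++ class_is ++ "\" href=\"linker_" ++ p.2 ++ ".html\">"
      ++ PySem.Int.toStr (p.1 + 1) ++ ". " ++ p.2 ++ " <br><small>"
      ++ d.getD p.2 "" ++ "</small> </a>\n")) s3
  s4 ++ "</div>\n\n"

-- ===== PORT B =====
-- transliteration of Source B: a record table (href, text, active), then one rendering pass.
def make_sidebar_alt (field_dict : List (String × String)) (active_idx : Option Int) : String :=
  let d := PySem.Dict.ofList field_dict
  let records : List (String × String × Bool) :=
    [("index.html", "Home", active_idx.isNone),
     ("linker_target_amptime_summary_plotly_interactive.html", "Target Summary Amp-Time",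
      active_idx == some 0),
     ("linker_target_ampfreq_summary_plotly_interactive.html", "Target Summary Amp-Freq",
      active_idx == some 1)]
    ++ (PySem.List.enumerate d.keys 0).map (fun p =>
        ("linker_" ++ p.2 ++ ".html",
         PySem.Int.toStr (p.1 + 1) ++ ". " ++ p.2 ++ " <br><small>" ++ d.getD p.2 "" ++ "</small> ",
         active_idx.isSome && (active_idx.map (· - 2) == some p.1)))
  let parts := ["<div class=\"sidebar\">\n"]
    ++ records.map (fun r =>
         "    <a class=\"" ++ (if r.2.2 then "active" else "") ++ "\" href=\"" ++ r.1 ++ "\">" ++ r.2.1 ++ "</a>\n")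
    ++ ["</div>\n\n"]
  PySem.Str.join "" parts

-- ===== PRECONDITION & SPEC =====
def Spec_make_sidebar (field_dict : List (String × String)) (active_idx : Option Int) (out : String) : Prop := out = make_sidebar_alt field_dict active_idx
instance (field_dict : List (String × String)) (active_idx : Option Int) (out : String) : Decidable (Spec_make_sidebar field_dict active_idx out) := by unfold Spec_make_sidebar; infer_instance

-- ===== CLAIM (what is proved, stated in full; the proofs are below) =====
def Claim_equal_make_sidebar : Prop := ∀ (field_dict : List (String × String)) (active_idx : Option Int), Dom_make_sidebar field_dict active_idx → Spec_make_sidebar field_dict active_idx (make_sidebar field_dict active_idx)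

-- ===== LEMMAS AND PROOFS =====

theorem join_empty_cons (a : String) (l : List String) :
    PySem.Str.join "" (a :: l) = a ++ PySem.Str.join "" l := by
  apply (@String.toList_inj _ _).mp
  simp [PySem.Str.toList_join]
  cases l with
  | nil => simp
  | cons b bs => simp [PySem.Chars.join_cons_cons]

theorem join_empty_nil : PySem.Str.join "" ([] : List String) = "" := by decide

theorem join_empty_append (l₁ l₂ : List String) :
    PySem.Str.join "" (l₁ ++ l₂) = PySem.Str.join "" l₁ ++ PySem.Str.join "" l₂ := by
  induction l₁ with
  | nil => simp [join_empty_nil]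
  | cons a as ih => simp [join_empty_cons, ih, String.append_assoc]

theorem foldl_str_append {α : Type} (l : List α) (f : α → String) (acc : String) :
    l.foldl (fun acc x => acc ++ f x) acc = acc ++ PySem.Str.join "" (l.map f) := by
  induction l generalizing acc with
  | nil => simp [join_empty_nil]
  | cons a as ih => simp [List.foldl_cons, ih, join_empty_cons, String.append_assoc]

theorem home_eq (ai : Option Int) :
    (match ai with
      | none => "    <a class=\"active\" href=\"index.html\">Home</a>\n"
      | some _ => "    <a class=\"\" href=\"index.html\">Home</a>\n")
    = ("    <a class=\"" ++ if ai.isNone = true then "active" else "") ++ "\" href=\"" ++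
        "index.html" ++ "\">" ++ "Home" ++ "</a>\n" := by
  cases ai with
  | none => decide
  | some a =>
    simp only [Option.isNone_some, Bool.false_eq_true, if_false]
    decide

-- ===== VERDICT (by name: the statement is the Claim_ definition above) =====
theorem make_sidebar_spec : Claim_equal_make_sidebar := by
  unfold Claim_equal_make_sidebar
  intro fd ai hD
  clear hD
  unfold Spec_make_sidebar make_sidebar make_sidebar_alt
  simp only
  rw [foldl_str_append]
  simp only [List.map_cons, List.map_map, List.cons_append, List.nil_append]
  rw [join_empty_cons, join_empty_cons, join_empty_cons, join_empty_cons,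
    join_empty_append, join_empty_cons, join_empty_nil]
  rw [home_eq]
  rw [show (".html\">Target Summary Amp-Time</a>\n" : String)
        = ".html" ++ "\">" ++ "Target Summary Amp-Time" ++ "</a>\n" from by decide,
      show (".html\">Target Summary Amp-Freq</a>\n" : String)
        = ".html" ++ "\">" ++ "Target Summary Amp-Freq" ++ "</a>\n" from by decide,
      show ("\" href=\"linker_" : String) = "\" href=\"" ++ "linker_" from by decide,
      show (".html\">" : String) = ".html" ++ "\">" from by decide,
      show ("</small> </a>\n" : String) = "</small> " ++ "</a>\n" from by decide,
      show ("linker_target_amptime_summary_plotly_interactive.html" : String)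
        = "linker_" ++ "target_amptime_summary_plotly_interactive" ++ ".html" from by decide,
      show ("linker_target_ampfreq_summary_plotly_interactive.html" : String)
        = "linker_" ++ "target_ampfreq_summary_plotly_interactive" ++ ".html" from by decide]
  simp only [beq_iff_eq, String.append_assoc, String.append_empty]
  have hmap :
      List.map
        ((fun (r : String × String × Bool) =>
            "    <a class=\"" ++ ((if r.2.2 = true then "active" else "") ++
              ("\" href=\"" ++ (r.1 ++ ("\">" ++ (r.2.1 ++ "</a>\n")))))) ∘
          fun (p : Int × String) =>
            ("linker_" ++ (p.2 ++ ".html"),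
              PySem.Int.toStr (p.1 + 1) ++ (". " ++ (p.2 ++ (" <br><small>" ++
                ((PySem.Dict.ofList fd).getD p.2 "" ++ "</small> ")))),
              ai.isSome && Option.map (fun x => x - 2) ai == some p.1))
        (PySem.List.enumerate (PySem.Dict.ofList fd).keys)
      = List.map
        (fun (p : Int × String) =>
          "    <a class=\"" ++ ((match ai with
            | none => ""
            | some a => if p.1 = a - 2 then "active" else "") ++
            ("\" href=\"" ++ ("linker_" ++ (p.2 ++ (".html" ++ ("\">" ++
              (PySem.Int.toStr (p.1 + 1) ++ (". " ++ (p.2 ++ (" <br><small>" ++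
                ((PySem.Dict.ofList fd).getD p.2 "" ++ ("</small> " ++ "</a>\n")))))))))))))
        (PySem.List.enumerate (PySem.Dict.ofList fd).keys) := by
    apply List.map_congr_left
    intro p _
    simp only [Function.comp_apply, String.append_assoc]
    have hcls : (if (ai.isSome && (Option.map (fun x => x - 2) ai == some p.1)) = true
          then "active" else "")
        = (match ai with
          | none => ""
          | some a => if p.1 = a - 2 then ("active" : String) else "") := by
      cases ai with
      | none => simp
      | some a =>
        by_cases h : p.1 = a - 2
        · simp [h]
        · have h2 : ¬ (a - 2 = p.1) := fun hh => h (Eq.symm hh)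
          simp [h, h2]
    rw [hcls]
  rw [hmap]
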